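-- pv_equiv track=rewrite | github.com/leprohonmalo/Projet_Long | src/toto.py | mk_align_dict
-- ===== SOURCE A (Python) =====
-- def mk_align_dict(query_align,template_align):
--     """ This function takes as input an aligned query sequence and an aligned
--         corresponding template sequence. It returns a dictionnary with template
--         sequence positions as keys and the matching query sequence
--         positions as value. Positions with no match are omitted.
--
--         Parameters:
--             - query_align : a string representing aligned query sequence.
--             - template_align : a string representing aligned template sequence.
--
--         Output:
--             - align_dict : a dictionnary with template sequence positions as
--             keys and the matching query sequence positions as value.
--     """
--     align_dict = {}
--     q_pos = 1
--     t_pos = 1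
--     for i in range(len(query_align)):
--         if (query_align[i] != "-") and (template_align[i] != "-"):
--             align_dict[t_pos] = q_pos
--             q_pos = q_pos + 1
--             t_pos = t_pos + 1
--         elif query_align[i] != "-":
--             q_pos = q_pos + 1
--         elif template_align[i] != "-":
--             t_pos = t_pos + 1
--     return align_dict
-- ===== SOURCE B (Python) =====
-- def mk_align_dict(query_align, template_align):
--     pairs = list(zip(query_align, template_align))
--     qpos, tpos = [], []
--     qp = tp = 0
--     for qc, tc in pairs:
--         if qc != "-":
--             qp += 1
--         if tc != "-":
--             tp += 1
--         qpos.append(qp)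
--         tpos.append(tp)
--     return {t: q for (qc, tc), t, q in zip(pairs, tpos, qpos)
--             if qc != "-" and tc != "-"}
-- ===== Notes on version B (the rewrite author's own statement) =====
-- stated objective: alternative
-- what changed: A's single fused loop threads two mutable counters and a dict; B instead zips the two sequences, builds prefix-count tables qpos/tpos in one pass, and then produces the result by a separate filtered pass over zip(pairs, tpos, qpos) with no mutable counters in the selection step.
import Mathlib
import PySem

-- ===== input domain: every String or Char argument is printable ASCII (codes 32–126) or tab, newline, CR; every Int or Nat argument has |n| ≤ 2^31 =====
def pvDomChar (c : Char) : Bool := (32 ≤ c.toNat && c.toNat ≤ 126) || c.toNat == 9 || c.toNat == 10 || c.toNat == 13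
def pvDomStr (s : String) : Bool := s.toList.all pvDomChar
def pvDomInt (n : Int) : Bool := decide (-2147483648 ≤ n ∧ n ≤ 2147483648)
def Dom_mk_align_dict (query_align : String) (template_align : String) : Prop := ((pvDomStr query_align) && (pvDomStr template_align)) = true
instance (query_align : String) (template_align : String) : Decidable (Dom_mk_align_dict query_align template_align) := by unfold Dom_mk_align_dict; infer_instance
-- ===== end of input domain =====

-- B replaces A's fused counter-and-dict loop by a prefix-count table pass over the zipped
-- sequences followed by a separate filtered selection pass (alternative decomposition, same cost).

-- ===== PORT A =====
def mk_align_dict (query_align : String) (template_align : String) : List (Int × Int) :=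
  let ql := query_align.toList
  let tl := template_align.toList
  (((PySem.List.pyRange 0 (ql.length : Int) 1).foldl
      (fun (st : PySem.Dict Int Int × Int × Int) i =>
        let qc := PySem.List.pyGetD ql i ' '
        let tc := PySem.List.pyGetD tl i ' '
        if qc ≠ '-' ∧ tc ≠ '-' then (st.1.insert st.2.2 st.2.1, st.2.1 + 1, st.2.2 + 1)
        else if qc ≠ '-' then (st.1, st.2.1 + 1, st.2.2)
        else if tc ≠ '-' then (st.1, st.2.1, st.2.2 + 1)
        else st)
      (PySem.Dict.empty, 1, 1)).1).items

-- ===== PORT B =====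
def mk_align_dict_alt (query_align : String) (template_align : String) : List (Int × Int) :=
  let pairs := query_align.toList.zip template_align.toList
  let acc := pairs.foldl
      (fun (st : List Int × List Int × Int × Int) p =>
        let qp := if p.1 ≠ '-' then st.2.2.1 + 1 else st.2.2.1
        let tp := if p.2 ≠ '-' then st.2.2.2 + 1 else st.2.2.2
        (st.1 ++ [qp], st.2.1 ++ [tp], qp, tp))
      ([], [], 0, 0)
  (pairs.zip (acc.2.1.zip acc.1)).filterMap
    (fun x => if x.1.1 ≠ '-' ∧ x.1.2 ≠ '-' then some (x.2.1, x.2.2) else none)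

-- ===== PRECONDITION & SPEC =====
-- Python A indexes template_align[i] for every i < len(query_align): it raises IndexError
-- when the template is shorter than the query; exactly those inputs are excluded.
def Pre_mk_align_dict (query_align : String) (template_align : String) : Prop :=
  query_align.toList.length ≤ template_align.toList.length
instance (query_align : String) (template_align : String) : Decidable (Pre_mk_align_dict query_align template_align) := by unfold Pre_mk_align_dict; infer_instance

def pvWitness_mk_align_dict : String × String := ("A-CG", "AGC-")

def Spec_mk_align_dict (query_align : String) (template_align : String) (out : List (Int × Int)) : Prop := out = mk_align_dict_alt query_align template_align
instance (query_align : String) (template_align : String) (out : List (Int × Int)) : Decidable (Spec_mk_align_dict query_align template_align out) := by unfold Spec_mk_align_dict; infer_instance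

-- ===== CLAIM (what is proved, stated in full; the proofs are below) =====
def Claim_equal_mk_align_dict : Prop := ∀ (query_align : String) (template_align : String), Dom_mk_align_dict query_align template_align → Pre_mk_align_dict query_align template_align → Spec_mk_align_dict query_align template_align (mk_align_dict query_align template_align)

-- ===== LEMMAS AND PROOFS =====

/-- Common recursive characterisation: emitted (t_pos, q_pos) pairs, counts-so-far style. -/
def pvCore : List (Char × Char) → Int → Int → List (Int × Int)
  | [], _, _ => []
  | (qc, tc) :: rest, qp, tp =>
    let qp' := if qc ≠ '-' then qp + 1 else qp
    let tp' := if tc ≠ '-' then tp + 1 else tp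
    (if qc ≠ '-' ∧ tc ≠ '-' then [(tp', qp')] else []) ++ pvCore rest qp' tp'

/-- The prefix-count tables B builds, recursively. -/
def pvPre : List (Char × Char) → Int → Int → List Int × List Int
  | [], _, _ => ([], [])
  | (qc, tc) :: rest, qp, tp =>
    let qp' := if qc ≠ '-' then qp + 1 else qp
    let tp' := if tc ≠ '-' then tp + 1 else tp
    let r := pvPre rest qp' tp'
    (qp' :: r.1, tp' :: r.2)

/-- A's loop body as a function of the two characters read at index i. -/
def pvStepA (st : PySem.Dict Int Int × Int × Int) (qc tc : Char) :
    PySem.Dict Int Int × Int × Int :=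
  if qc ≠ '-' ∧ tc ≠ '-' then (st.1.insert st.2.2 st.2.1, st.2.1 + 1, st.2.2 + 1)
  else if qc ≠ '-' then (st.1, st.2.1 + 1, st.2.2)
  else if tc ≠ '-' then (st.1, st.2.1, st.2.2 + 1)
  else st

/-- An index loop over range(len ql) reading ql[i], tl[i] is a fold over zip ql tl. -/
lemma pvFoldRangeZipAux {σ : Type} (f : σ → Char → Char → σ) (ql tl : List Char)
    (h : ql.length ≤ tl.length) :
    ∀ (n k : Nat), ql.length - k = n → ∀ init : σ,
      (PySem.List.pyRange (k : Int) (ql.length : Int) 1).foldl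
        (fun s i => f s (PySem.List.pyGetD ql i ' ') (PySem.List.pyGetD tl i ' ')) init
      = ((ql.drop k).zip (tl.drop k)).foldl (fun s p => f s p.1 p.2) init := by
  intro n
  induction n with
  | zero =>
    intro k hk init
    rw [PySem.List.pyRange_one_eq_nil (by exact_mod_cast (by omega : ql.length ≤ k))]
    have hd : ql.drop k = [] := List.drop_eq_nil_of_le (by omega)
    simp [hd]
  | succ m ih =>
    intro k hk init
    have hkq : k < ql.length := by omega
    have hkt : k < tl.length := by omega
    rw [PySem.List.pyRange_one_cons (by exact_mod_cast hkq)]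
    simp only [List.foldl_cons]
    have e1 : PySem.List.pyGetD ql (k : Int) ' ' = ql[k] := by
      simp [hkq]
    have e2 : PySem.List.pyGetD tl (k : Int) ' ' = tl[k] := by
      simp [hkt]
    rw [e1, e2]
    have ecast : (k : Int) + 1 = ((k + 1 : Nat) : Int) := by push_cast; ring
    rw [ecast, ih (k + 1) (by omega)]
    rw [List.drop_eq_getElem_cons hkq, List.drop_eq_getElem_cons hkt,
      List.zip_cons_cons, List.foldl_cons]

/-- A's fold over the zipped pairs appends exactly pvCore to the dict (fresh increasing keys). -/
lemma pvAfold (pairs : List (Char × Char)) :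
    ∀ (d : PySem.Dict Int Int) (qp tp : Int), (∀ k ∈ d.keys, k ≤ tp) →
      ((pairs.foldl
          (fun (st : PySem.Dict Int Int × Int × Int) p =>
            if p.1 ≠ '-' ∧ p.2 ≠ '-' then (st.1.insert st.2.2 st.2.1, st.2.1 + 1, st.2.2 + 1)
            else if p.1 ≠ '-' then (st.1, st.2.1 + 1, st.2.2)
            else if p.2 ≠ '-' then (st.1, st.2.1, st.2.2 + 1)
            else st)
          (d, qp + 1, tp + 1)).1).items = d.items ++ pvCore pairs qp tp := by
  induction pairs with
  | nil => intro d qp tp _; simp [pvCore]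
  | cons p rest ih =>
    intro d qp tp hinv
    obtain ⟨qc, tc⟩ := p
    simp only [List.foldl_cons]
    by_cases hq : qc = '-' <;> by_cases ht : tc = '-'
    · -- both gaps: state unchanged
      rw [if_neg (by simp [hq]), if_neg (by simp [hq]), if_neg (by simp [ht])]
      rw [ih d qp tp hinv]
      simp [pvCore, hq, ht]
    · -- query gap, template non-gap: t_pos advances
      rw [if_neg (by simp [hq]), if_neg (by simp [hq]), if_pos ht]
      rw [ih d qp (tp + 1) (fun k hk => by have := hinv k hk; omega)]
      simp [pvCore, hq, ht]
    · -- query non-gap, template gap: q_pos advances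
      rw [if_neg (by simp [ht]), if_pos hq]
      rw [ih d (qp + 1) tp hinv]
      simp [pvCore, hq, ht]
    · -- both non-gap: insert fresh key tp + 1
      rw [if_pos ⟨hq, ht⟩]
      have hfresh : d.contains (tp + 1) = false := by
        by_contra hc
        have hc' : d.contains (tp + 1) = true := by
          revert hc; cases d.contains (tp + 1) <;> simp
        have hmem : (tp + 1) ∈ d.keys := by
          simpa [← PySem.Dict.contains_iff_mem_keys] using hc'
        have := hinv _ hmem; omega
      have hkeys : ∀ k ∈ (d.insert (tp + 1) (qp + 1)).keys, k ≤ tp + 1 := by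
        intro k hk
        rcases (PySem.Dict.mem_keys_insert d (tp + 1) k (qp + 1)).1 hk with h1 | h1
        · omega
        · have := hinv _ h1; omega
      rw [ih (d.insert (tp + 1) (qp + 1)) (qp + 1) (tp + 1) hkeys,
        PySem.Dict.items_insert_of_not_contains d (qp + 1) hfresh]
      simp [pvCore, hq, ht]

/-- B's accumulating fold computes the prefix-count tables pvPre. -/
lemma pvBfold (pairs : List (Char × Char)) :
    ∀ (qs ts : List Int) (qp tp : Int),
      ((pairs.foldl
          (fun (st : List Int × List Int × Int × Int) p =>
            ((st.1 ++ [if p.1 ≠ '-' then st.2.2.1 + 1 else st.2.2.1]),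
             (st.2.1 ++ [if p.2 ≠ '-' then st.2.2.2 + 1 else st.2.2.2]),
             (if p.1 ≠ '-' then st.2.2.1 + 1 else st.2.2.1),
             (if p.2 ≠ '-' then st.2.2.2 + 1 else st.2.2.2)))
          (qs, ts, qp, tp)).1 = qs ++ (pvPre pairs qp tp).1)
      ∧ ((pairs.foldl
          (fun (st : List Int × List Int × Int × Int) p =>
            ((st.1 ++ [if p.1 ≠ '-' then st.2.2.1 + 1 else st.2.2.1]),
             (st.2.1 ++ [if p.2 ≠ '-' then st.2.2.2 + 1 else st.2.2.2]),
             (if p.1 ≠ '-' then st.2.2.1 + 1 else st.2.2.1),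
             (if p.2 ≠ '-' then st.2.2.2 + 1 else st.2.2.2)))
          (qs, ts, qp, tp)).2.1 = ts ++ (pvPre pairs qp tp).2) := by
  induction pairs with
  | nil => intro qs ts qp tp; simp [pvPre]
  | cons p rest ih =>
    intro qs ts qp tp
    obtain ⟨qc, tc⟩ := p
    simp only [List.foldl_cons, pvPre]
    constructor
    · rw [(ih _ _ _ _).1]; simp
    · rw [(ih _ _ _ _).2]; simp

/-- The filtered pass over zip(pairs, tpos, qpos) is pvCore. -/
lemma pvZipCore (pairs : List (Char × Char)) :
    ∀ (qp tp : Int),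
      (pairs.zip ((pvPre pairs qp tp).2.zip (pvPre pairs qp tp).1)).filterMap
        (fun x => if x.1.1 ≠ '-' ∧ x.1.2 ≠ '-' then some (x.2.1, x.2.2) else none)
      = pvCore pairs qp tp := by
  induction pairs with
  | nil => intro qp tp; simp [pvPre, pvCore]
  | cons p rest ih =>
    intro qp tp
    obtain ⟨qc, tc⟩ := p
    by_cases hq : qc ≠ '-' <;> by_cases ht : tc ≠ '-' <;>
      simp [pvPre, pvCore, hq, ht, ih]

-- ===== VERDICT (by name: the statement is the Claim_ definition above) =====
theorem mk_align_dict_spec : Claim_equal_mk_align_dict := by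
  intro q t _ hpre
  unfold Pre_mk_align_dict at hpre
  unfold Spec_mk_align_dict
  dsimp only [mk_align_dict, mk_align_dict_alt]
  have h1 := pvFoldRangeZipAux pvStepA q.toList t.toList hpre q.toList.length 0 rfl
      ((PySem.Dict.empty : PySem.Dict Int Int), 1, 1)
  simp only [Nat.cast_zero, List.drop_zero, pvStepA] at h1
  rw [h1]
  have h2 := pvAfold (q.toList.zip t.toList) PySem.Dict.empty 0 0 (by simp)
  simp only [zero_add] at h2
  rw [h2]
  have h3 := pvBfold (q.toList.zip t.toList) [] [] 0 0
  rw [h3.1, h3.2]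
  simp only [List.nil_append]
  rw [pvZipCore]
  simp [PySem.Dict.empty]
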